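-- pv_equiv track=rewrite | github.com/jediahkatz/you-only-randomize-once | src/solve.py | parse_clasp_output
-- ===== SOURCE A (Python) =====
-- def parse_clasp_output(output_lines):
--   """
--   Takes in the stdout from the Clasp SAT solver as a list of lines and returns
--   the solution as a list of true literals. Assumes solving was successful.
--   """
--   # solution line should be of the form 'v -1 2 3' or 'v -1 2 3 0'
--   solution_literals = []
--   if any('s UNSATISFIABLE' in line for line in output_lines):
--     return None
--   solution_lines = (line for line in output_lines if line and line[0] == 'v')
--   for solution_line in solution_lines:
--     line_strs = solution_line[2:].split(' ')
--     solution_literals.extend(int(literal) for literal in line_strs if literal != '0')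
--   return solution_literals
-- ===== SOURCE B (Python) =====
-- def parse_clasp_output(output_lines):
--   """Single pass: collect raw literal tokens and an UNSAT flag together,
--   then convert the tokens to ints at the end."""
--   unsat = False
--   tokens = []
--   for line in output_lines:
--     if 's UNSATISFIABLE' in line:
--       unsat = True
--     if line and line[0] == 'v':
--       tokens.extend(t for t in line[2:].split(' ') if t != '0')
--   if unsat:
--     return None
--   return [int(t) for t in tokens]
-- ===== Notes on version B (the rewrite author's own statement) =====
-- stated objective: alternative
-- what changed: A's two separate scans (an any() substring pass for 's UNSATISFIABLE' plus a second generator pass parsing 'v' lines with int()) are merged into one loop that accumulates the unsat flag and the raw tokens together, with the int() conversion done once at the end.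
-- outside the precondition, e.g. on parse_clasp_output(['v a']): A raises ValueError, B raises ValueError
import Mathlib
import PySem

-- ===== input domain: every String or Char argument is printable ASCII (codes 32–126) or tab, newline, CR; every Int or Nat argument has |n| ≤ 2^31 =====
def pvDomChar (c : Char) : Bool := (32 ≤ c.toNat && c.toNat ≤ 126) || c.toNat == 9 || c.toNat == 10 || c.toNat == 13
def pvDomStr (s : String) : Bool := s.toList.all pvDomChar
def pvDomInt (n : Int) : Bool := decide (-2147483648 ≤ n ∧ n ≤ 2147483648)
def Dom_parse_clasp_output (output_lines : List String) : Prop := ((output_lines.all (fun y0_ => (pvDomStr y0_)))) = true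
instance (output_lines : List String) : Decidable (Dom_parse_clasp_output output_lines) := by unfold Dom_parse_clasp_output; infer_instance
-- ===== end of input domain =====

-- B replaces A's two scans (an any() UNSAT pass plus a second pass parsing 'v' lines) by one
-- pass that gathers the raw tokens and the UNSAT flag together, converting to int at the end
-- (objective: alternative decomposition, same cost).

-- ===== PORT A =====
-- per-line body of A's loop: extend the accumulated literals with
-- int(literal) for literal in line[2:].split(' ') if literal != '0'
-- (acc = none models a ValueError already raised; int() failing makes mapM none)
def pvA_step (acc : Option (List Int)) (line : String) : Option (List Int) :=
  if line ≠ "" ∧ PySem.Str.pyGet? line 0 = some 'v' then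
    acc.bind (fun lits =>
      ((((PySem.Str.split? (PySem.Str.slice line (some 2) none) " ").getD []).filter
          (fun t => t ≠ "0")).mapM PySem.Int.ofStr?).map (fun ns => lits ++ ns))
  else acc

def parse_clasp_output (output_lines : List String) : Option (List Int) :=
  if output_lines.any (fun line => PySem.Str.isIn "s UNSATISFIABLE" line) then none
  else output_lines.foldl pvA_step (some [])

-- ===== PORT B =====
-- tokens contributed by one line: line[2:].split(' ') without '0's when the line is a 'v' line
def pvVTokens (line : String) : List String :=
  if line ≠ "" ∧ PySem.Str.pyGet? line 0 = some 'v' then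
    ((PySem.Str.split? (PySem.Str.slice line (some 2) none) " ").getD []).filter (fun t => t ≠ "0")
  else []

-- one step of B's single loop: (unsat flag, raw tokens so far)
def pvB_step (st : Bool × List String) (line : String) : Bool × List String :=
  ((st.1 || PySem.Str.isIn "s UNSATISFIABLE" line), st.2 ++ pvVTokens line)

def parse_clasp_output_alt (output_lines : List String) : Option (List Int) :=
  let st := output_lines.foldl pvB_step (false, [])
  if st.1 then none
  else
    match st.2.mapM PySem.Int.ofStr? with  -- [int(t) for t in tokens]; none = ValueError, outside Pre_
    | none => none
    | some lits => some lits

-- ===== PRECONDITION & SPEC =====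
-- Pre_ excludes exactly the inputs where the Python A raises ValueError: no UNSAT line
-- and some kept token of a 'v' line is not int()-parseable (B raises there too).
def Pre_parse_clasp_output (output_lines : List String) : Prop :=
  (output_lines.any (fun line => PySem.Str.isIn "s UNSATISFIABLE" line) = true) ∨
  (∀ line ∈ output_lines, ∀ t ∈ pvVTokens line, (PySem.Int.ofStr? t).isSome)
instance (output_lines : List String) : Decidable (Pre_parse_clasp_output output_lines) := by
  unfold Pre_parse_clasp_output; infer_instance

def pvWitness_parse_clasp_output : List String := ["c comment", "s SATISFIABLE", "v -1 2 3 0"]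

def Spec_parse_clasp_output (output_lines : List String) (out : Option (List Int)) : Prop := out = parse_clasp_output_alt output_lines
instance (output_lines : List String) (out : Option (List Int)) : Decidable (Spec_parse_clasp_output output_lines out) := by unfold Spec_parse_clasp_output; infer_instance

-- ===== CLAIM (what is proved, stated in full; the proofs are below) =====
def Claim_equal_parse_clasp_output : Prop := ∀ (output_lines : List String), Dom_parse_clasp_output output_lines → Pre_parse_clasp_output output_lines → Spec_parse_clasp_output output_lines (parse_clasp_output output_lines)

-- ===== LEMMAS AND PROOFS =====

-- the flag of B's fold is A's any()
theorem pvB_fold_fst (lines : List String) (b : Bool) (ts : List String) :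
    (lines.foldl pvB_step (b, ts)).1
      = (b || lines.any (fun line => PySem.Str.isIn "s UNSATISFIABLE" line)) := by
  induction lines generalizing b ts with
  | nil => simp
  | cons l ls ih => simp [pvB_step, ih, Bool.or_assoc]

-- the token list of B's fold is the concatenation of per-line tokens
theorem pvB_fold_snd (lines : List String) (b : Bool) (ts : List String) :
    (lines.foldl pvB_step (b, ts)).2 = ts ++ lines.flatMap pvVTokens := by
  induction lines generalizing b ts with
  | nil => simp
  | cons l ls ih => simp [pvB_step, ih]

-- a ValueError already raised stays raised through the rest of A's loop
theorem pvA_fold_none (lines : List String) : lines.foldl pvA_step none = none := by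
  induction lines with
  | nil => rfl
  | cons l ls ih =>
    have h : pvA_step none l = none := by unfold pvA_step; split <;> rfl
    rw [List.foldl_cons, h, ih]

-- A's fold parses exactly the concatenated tokens, appended to the accumulator
theorem pvA_fold (lines : List String) (acc : List Int) :
    lines.foldl pvA_step (some acc)
      = ((lines.flatMap pvVTokens).mapM PySem.Int.ofStr?).map (fun ns => acc ++ ns) := by
  induction lines generalizing acc with
  | nil => simp
  | cons l ls ih =>
    rw [List.foldl_cons, List.flatMap_cons, List.mapM_append]
    cases hm : (pvVTokens l).mapM PySem.Int.ofStr? with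
    | none =>
      have hstep : pvA_step (some acc) l = none := by
        by_cases h : l ≠ "" ∧ PySem.Str.pyGet? l 0 = some 'v'
        · rw [pvVTokens, if_pos h] at hm
          rw [pvA_step, if_pos h, Option.bind_some, hm]
          rfl
        · rw [pvVTokens, if_neg h] at hm
          simp at hm
      rw [hstep, pvA_fold_none]
      rfl
    | some ns =>
      have hstep : pvA_step (some acc) l = some (acc ++ ns) := by
        by_cases h : l ≠ "" ∧ PySem.Str.pyGet? l 0 = some 'v'
        · rw [pvVTokens, if_pos h] at hm
          rw [pvA_step, if_pos h, Option.bind_some, hm]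
          rfl
        · rw [pvVTokens, if_neg h] at hm
          simp only [List.mapM_nil, pure, Option.some.injEq] at hm
          rw [pvA_step, if_neg h, ← hm, List.append_nil]
      rw [hstep, ih (acc ++ ns)]
      cases (ls.flatMap pvVTokens).mapM PySem.Int.ofStr? <;> simp

-- ===== VERDICT (by name: the statement is the Claim_ definition above) =====
theorem parse_clasp_output_spec : Claim_equal_parse_clasp_output := by
  intro lines _ _
  unfold Spec_parse_clasp_output parse_clasp_output parse_clasp_output_alt
  simp only [pvB_fold_fst, pvB_fold_snd, Bool.false_or, List.nil_append]
  by_cases h : lines.any (fun line => PySem.Str.isIn "s UNSATISFIABLE" line) = true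
  · rw [if_pos h, if_pos h]
  · rw [if_neg h, if_neg h, pvA_fold]
    cases (lines.flatMap pvVTokens).mapM PySem.Int.ofStr? <;> simp
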